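-- pv_equiv track=rewrite | github.com/josecatela/sgcodewars | day26/day26.py | ccquiel_day26
-- ===== SOURCE A (Python) =====
-- def ccquiel_day26(chars, n):
--     tree = str()
--     chars_len = len(chars)
--     lcount = 0
--     for i in range(1, n+1):
--         leaves = ' '.join([chars[(lcount + j) % chars_len] for j in range(i)])
--         tree += ' '*(n - i) + leaves + '\n'
--         lcount += i
--     trunk = (' '*(n-1) + '|\n')*(n // 3)
--     tree += trunk[:-1]
--     return tree
-- ===== SOURCE B (Python) =====
-- def ccquiel_day26(chars, n):
--     m = len(chars)
--     total = n * (n + 1) // 2 if n > 0 else 0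
--     pieces = []
--     row, col = 1, 0
--     # one flat pass over all leaf positions, emitting padding/char/separator as we go
--     for k in range(total):
--         if col == 0:
--             pieces.append(' ' * (n - row))
--         pieces.append(chars[k % m])
--         col += 1
--         if col == row:
--             pieces.append('\n')
--             row += 1
--             col = 0
--         else:
--             pieces.append(' ')
--     pieces.append('\n'.join([' ' * (n - 1) + '|'] * (n // 3)))
--     return ''.join(pieces)
-- ===== Notes on version B (the rewrite author's own statement) =====
-- stated objective: alternative
-- what changed: B replaces A's nested per-row construction (inner list comprehension joined per row, trunk built by string repetition and trimmed with [:-1]) by ONE flat loop over all n*(n+1)//2 leaf positions that maintains row/col counters and emits padding, the cyclic character and the right separator (space or newline) position by position, with the trunk produced by a '\n'-join of a replicated row; Pre_ excludes empty chars with n>=1, where A (and B) raise ZeroDivisionError.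
import Mathlib
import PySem

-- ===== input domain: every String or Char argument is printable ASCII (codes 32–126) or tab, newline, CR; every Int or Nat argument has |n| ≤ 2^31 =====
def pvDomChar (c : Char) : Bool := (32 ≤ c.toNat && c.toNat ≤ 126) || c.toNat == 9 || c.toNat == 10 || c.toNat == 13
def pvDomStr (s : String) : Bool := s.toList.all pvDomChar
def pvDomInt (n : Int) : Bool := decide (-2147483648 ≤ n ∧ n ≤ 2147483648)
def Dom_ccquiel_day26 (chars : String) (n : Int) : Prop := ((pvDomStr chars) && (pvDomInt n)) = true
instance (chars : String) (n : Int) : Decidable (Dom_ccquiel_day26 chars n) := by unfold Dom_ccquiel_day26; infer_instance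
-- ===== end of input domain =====

-- B builds the whole tree in ONE flat loop over all leaf positions (with row/col counters emitting
-- padding, character and separator position by position) instead of A's nested per-row construction;
-- the trunk is a '\n'-join of a replicated row instead of a repeated string trimmed with [:-1].

-- chars[k % len(chars)]  (shared helper of both ports)
def pvChr (cs : List Char) (k : Int) : Char :=
  PySem.List.pyGetD cs (PySem.Int.mod k (cs.length : Int)) ' '

-- ===== PORT A =====

-- Python string repetition s * k (k : Int; non-positive → empty), on char lists
def pvRep (l : List Char) (k : Int) : List Char := (List.replicate k.toNat l).flatten

-- loop body: leaves = ' '.join([chars[(lcount+j) % chars_len] for j in range(i)]); tree += ' '*(n-i) + leaves + '\n'; lcount += i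
def pvStepA (cs : List Char) (n : Int) (st : List Char × Int) (i : Int) : List Char × Int :=
  (st.1 ++ List.replicate (n - i).toNat ' ' ++
     PySem.Chars.join [' ']
       ((PySem.List.pyRange 0 i 1).map (fun j => [pvChr cs (st.2 + j)])) ++ ['\n'],
   st.2 + i)

def ccquiel_day26 (chars : String) (n : Int) : String :=
  let cs := chars.toList
  let res := (PySem.List.pyRange 1 (n + 1) 1).foldl (pvStepA cs n) ([], 0)
  -- trunk = (' '*(n-1) + '|\n') * (n // 3); tree += trunk[:-1]
  let trunk := pvRep (List.replicate (n - 1).toNat ' ' ++ ['|', '\n']) (PySem.Int.floordiv n 3)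
  String.ofList (res.1 ++ PySem.List.slice trunk none (some (-1)))

-- ===== PORT B =====

-- loop body over one leaf position k, state (pieces-so-far flattened, row, col):
-- if col == 0: emit padding; emit chars[k % m]; col += 1; if col == row: emit '\n', next row, else emit ' '
-- (Python gathers the pieces in a list and ''.joins them at the end; the port concatenates directly)
def pvStepB (cs : List Char) (n : Int) (st : List Char × Int × Int) (k : Int) :
    List Char × Int × Int :=
  let o1 := if st.2.2 = 0 then st.1 ++ List.replicate (n - st.2.1).toNat ' ' else st.1
  let o2 := o1 ++ [pvChr cs k]
  if st.2.2 + 1 = st.2.1 then (o2 ++ ['\n'], st.2.1 + 1, 0)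
  else (o2 ++ [' '], st.2.1, st.2.2 + 1)

def ccquiel_day26_alt (chars : String) (n : Int) : String :=
  let cs := chars.toList
  let total : Int := if 0 < n then PySem.Int.floordiv (n * (n + 1)) 2 else 0
  let res := (PySem.List.pyRange 0 total 1).foldl (pvStepB cs n) ([], 1, 0)
  -- '\n'.join([' '*(n-1) + '|'] * (n // 3))
  let trunk := PySem.Chars.join ['\n']
    (List.replicate (PySem.Int.floordiv n 3).toNat (List.replicate (n - 1).toNat ' ' ++ ['|']))
  String.ofList (res.1 ++ trunk)

-- ===== PRECONDITION & SPEC =====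
-- Pre_ excludes exactly the inputs where A raises ZeroDivisionError ('% 0'): empty chars with n ≥ 1 (B raises there too).
def Pre_ccquiel_day26 (chars : String) (n : Int) : Prop := chars ≠ "" ∨ n ≤ 0
instance (chars : String) (n : Int) : Decidable (Pre_ccquiel_day26 chars n) := by unfold Pre_ccquiel_day26; infer_instance
def pvWitness_ccquiel_day26 : String × Int := ("ab", 5)

def Spec_ccquiel_day26 (chars : String) (n : Int) (out : String) : Prop := out = ccquiel_day26_alt chars n
instance (chars : String) (n : Int) (out : String) : Decidable (Spec_ccquiel_day26 chars n out) := by unfold Spec_ccquiel_day26; infer_instance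

-- ===== CLAIM (what is proved, stated in full; the proofs are below) =====
def Claim_equal_ccquiel_day26 : Prop := ∀ (chars : String) (n : Int), Dom_ccquiel_day26 chars n → Pre_ccquiel_day26 chars n → Spec_ccquiel_day26 chars n (ccquiel_day26 chars n)

-- ===== LEMMAS AND PROOFS =====

-- triangular numbers: lcount after k rows / number of leaf positions in the first k rows
def pvTri : Nat → Int
  | 0 => 0
  | k + 1 => pvTri k + ((k : Int) + 1)

theorem pvTri_nonneg (k : Nat) : 0 ≤ pvTri k := by
  induction k with
  | zero => simp [pvTri]
  | succ k ih => simp only [pvTri]; omega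

theorem pvTri_two_mul (k : Nat) : pvTri k * 2 = (k : Int) * ((k : Int) + 1) := by
  induction k with
  | zero => simp [pvTri]
  | succ k ih => simp only [pvTri]; push_cast; linear_combination ih

-- the i-th row with its newline, characters taken at flat offsets L, …, L+i-1
def pvRow (cs : List Char) (n i L : Int) : List Char :=
  List.replicate (n - i).toNat ' ' ++
    PySem.Chars.join [' ']
      ((PySem.List.pyRange L (L + i) 1).map (fun j => [pvChr cs j])) ++ ['\n']

def pvRows (cs : List Char) (n : Int) : Nat → List Char
  | 0 => []
  | k + 1 => pvRows cs n k ++ pvRow cs n ((k : Int) + 1) (pvTri k)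

-- shift a range-0 comprehension to absolute offsets
theorem pvRange_shift (L i : Int) (f : Int → List Char) :
    (PySem.List.pyRange 0 i 1).map (fun j => f (L + j)) = (PySem.List.pyRange L (L + i) 1).map f := by
  rw [PySem.List.pyRange_one 0 i, PySem.List.pyRange_one L (L + i)]
  simp [List.map_map, Function.comp_def]

-- A's loop = the rows concatenated, lcount = pvTri k
theorem pvFoldA (cs : List Char) (n : Int) (k : Nat) :
    (PySem.List.pyRange 1 ((k : Int) + 1) 1).foldl (pvStepA cs n) ([], 0)
      = (pvRows cs n k, pvTri k) := by
  induction k with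
  | zero => simp [PySem.List.pyRange_one_eq_nil, pvRows, pvTri]
  | succ k ih =>
    have h : (((k : Nat) + 1 : Nat) : Int) + 1 = ((k : Int) + 1) + 1 := by push_cast; ring
    rw [h, PySem.List.pyRange_one_succ_right (by omega : (1:Int) ≤ (k : Int) + 1), List.foldl_append,
      ih]
    simp only [List.foldl_cons, List.foldl_nil, pvStepA, pvRows, pvTri]
    refine Prod.ext ?_ (by push_cast; ring)
    simp only [pvRow, List.append_assoc]
    congr 3
    exact congrArg _ (pvRange_shift (pvTri k) ((k : Int) + 1) (fun j => [pvChr cs j]))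

-- the flat chars-and-spaces segment for offsets L, …, L+j-1
def pvSeg (cs : List Char) (L : Int) (j : Nat) : List Char :=
  (PySem.List.pyRange L (L + (j : Int)) 1).flatMap (fun t => [pvChr cs t, ' '])

theorem pvSeg_succ (cs : List Char) (L : Int) (j : Nat) :
    pvSeg cs L (j + 1) = [pvChr cs L, ' '] ++ pvSeg cs (L + 1) j := by
  simp only [pvSeg]
  rw [PySem.List.pyRange_one_cons (by push_cast; omega : L < L + ((j : Nat) + 1 : Nat))]
  have h : L + ((j : Nat) + 1 : Nat) = (L + 1) + (j : Int) := by push_cast; ring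
  rw [h, List.flatMap_cons]

theorem pvRange_ne_nil (a b : Int) (h : a < b) : PySem.List.pyRange a b 1 ≠ [] := by
  have := PySem.List.length_pyRange_one a b
  intro hnil
  rw [hnil] at this
  simp at this
  omega

theorem pvJoinAppend (sep : List Char) (L M : List (List Char)) (hL : L ≠ []) (hM : M ≠ []) :
    PySem.Chars.join sep (L ++ M) = PySem.Chars.join sep L ++ sep ++ PySem.Chars.join sep M := by
  induction L with
  | nil => simp at hL
  | cons x L ih =>
    cases L with
    | nil =>
      cases M with
      | nil => simp at hM
      | cons y M => simp [PySem.Chars.join_singleton, PySem.Chars.join_cons_cons]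
    | cons z L =>
      rw [List.cons_append, List.cons_append, PySem.Chars.join_cons_cons,
        PySem.Chars.join_cons_cons, ← List.cons_append, ih (by simp)]
      simp [List.append_assoc]

-- the flat segment plus its closing char IS the ' '-join of the row's characters
theorem pvSegJoin (cs : List Char) : ∀ (i : Nat), 1 ≤ i → ∀ (L : Int),
    pvSeg cs L (i - 1) ++ [pvChr cs (L + i - 1)]
      = PySem.Chars.join [' '] ((PySem.List.pyRange L (L + (i : Int)) 1).map (fun t => [pvChr cs t])) := by
  intro i
  induction i with
  | zero => omega
  | succ i ih =>
    intro _ L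
    cases Nat.eq_zero_or_pos i with
    | inl h0 =>
      subst h0
      rw [PySem.List.pyRange_one_cons (by push_cast; omega : L < L + ((0:Nat) + 1 : Nat)),
        PySem.List.pyRange_one_eq_nil (by push_cast; omega)]
      simp [pvSeg, PySem.List.pyRange_one_eq_nil, PySem.Chars.join_singleton]
    | inr h1 =>
      have hstep : pvSeg cs L (i + 1 - 1) = [pvChr cs L, ' '] ++ pvSeg cs (L + 1) (i - 1) := by
        have : i + 1 - 1 = (i - 1) + 1 := by omega
        rw [this, pvSeg_succ]
      rw [hstep, List.append_assoc,
        (by push_cast; ring : L + ((i : Nat) + 1 : Nat) - 1 = (L + 1) + (i : Int) - 1), ih h1 (L + 1)]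
      rw [PySem.List.pyRange_one_cons (by push_cast; omega : L < L + ((i : Nat) + 1 : Nat)),
        (by push_cast; ring : L + ((i : Nat) + 1 : Nat) = (L + 1) + (i : Int)), List.map_cons]
      rw [show ([pvChr cs L] :: (PySem.List.pyRange (L+1) ((L+1) + (i:Int)) 1).map (fun t => [pvChr cs t]))
            = [[pvChr cs L]] ++ (PySem.List.pyRange (L+1) ((L+1) + (i:Int)) 1).map (fun t => [pvChr cs t]) from rfl,
        pvJoinAppend [' '] _ _ (by simp)
          (by simp only [ne_eq, List.map_eq_nil_iff]; exact pvRange_ne_nil _ _ (by omega))]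
      simp [PySem.Chars.join_singleton]

-- B's flat loop across the tail of a row (col ≥ 1): finishes the row and starts the next
theorem pvInner (cs : List Char) (n : Int) : ∀ (j : Nat), 1 ≤ j → ∀ (i c L : Int) (out : List Char),
    1 ≤ c → c + j = i →
    (PySem.List.pyRange L (L + (j : Int)) 1).foldl (pvStepB cs n) (out, i, c)
      = (out ++ pvSeg cs L (j - 1) ++ [pvChr cs (L + j - 1), '\n'], i + 1, 0) := by
  intro j
  induction j with
  | zero => omega
  | succ j ih =>
    intro _ i c L out hc hci
    cases Nat.eq_zero_or_pos j with
    | inl h0 =>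
      subst h0
      rw [PySem.List.pyRange_one_cons (by push_cast; omega : L < L + ((0:Nat) + 1 : Nat)),
        PySem.List.pyRange_one_eq_nil (by push_cast; omega)]
      simp only [List.foldl_cons, List.foldl_nil, pvStepB]
      rw [if_pos (show c + 1 = i by push_cast at hci; omega), if_neg (show ¬ c = 0 by omega)]
      simp [pvSeg, PySem.List.pyRange_one_eq_nil]
    | inr h1 =>
      rw [PySem.List.pyRange_one_cons (by push_cast; omega : L < L + ((j : Nat) + 1 : Nat)),
        (by push_cast; ring : L + ((j : Nat) + 1 : Nat) = (L + 1) + (j : Int))]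
      simp only [List.foldl_cons, pvStepB]
      rw [if_neg (show ¬ c + 1 = i by push_cast at hci; omega), if_neg (show ¬ c = 0 by omega)]
      rw [ih h1 i (c + 1) (L + 1) _ (by omega) (by push_cast at hci ⊢; omega)]
      have hseg : pvSeg cs L (j + 1 - 1) = [pvChr cs L, ' '] ++ pvSeg cs (L + 1) (j - 1) := by
        have : j + 1 - 1 = (j - 1) + 1 := by omega
        rw [this, pvSeg_succ]
      rw [hseg, (by push_cast; ring : (L + 1) + (j : Int) - 1 = L + ((j : Nat) + 1 : Nat) - 1)]
      simp [List.append_assoc]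

-- B's flat loop across one whole row (starting at col = 0)
theorem pvRowFold (cs : List Char) (n : Int) (i : Nat) (hi : 1 ≤ i) (L : Int) (out : List Char) :
    (PySem.List.pyRange L (L + (i : Int)) 1).foldl (pvStepB cs n) (out, (i : Int), 0)
      = (out ++ pvRow cs n (i : Int) L, (i : Int) + 1, 0) := by
  have hrow : pvRow cs n (i : Int) L
      = List.replicate (n - (i : Int)).toNat ' ' ++ (pvSeg cs L (i - 1) ++ [pvChr cs (L + i - 1)]) ++ ['\n'] := by
    rw [pvRow, pvSegJoin cs i hi L]
  cases Nat.eq_zero_or_pos (i - 1) with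
  | inl h0 =>
    have h1 : i = 1 := by omega
    subst h1
    rw [PySem.List.pyRange_one_cons (by push_cast; omega : L < L + ((1:Nat) : Int)),
      PySem.List.pyRange_one_eq_nil (by push_cast; omega)]
    simp only [List.foldl_cons, List.foldl_nil, pvStepB, reduceIte]
    rw [if_pos (show (0:Int) + 1 = ((1:Nat):Int) by norm_num)]
    rw [hrow]
    simp [pvSeg, PySem.List.pyRange_one_eq_nil, List.append_assoc]
  | inr h2 =>
    rw [PySem.List.pyRange_one_cons (by omega : L < L + (i : Int)),
      (by omega : L + (i : Int) = (L + 1) + ((i - 1 : Nat) : Int))]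
    simp only [List.foldl_cons, pvStepB, reduceIte, zero_add]
    rw [if_neg (show ¬ (1:Int) = ((i:Nat):Int) by omega)]
    rw [pvInner cs n (i - 1) h2 (i : Int) 1 (L + 1) _ le_rfl (by omega)]
    have hseg : pvSeg cs L (i - 1) = [pvChr cs L, ' '] ++ pvSeg cs (L + 1) (i - 1 - 1) := by
      have : i - 1 = (i - 1 - 1) + 1 := by omega
      rw [this, pvSeg_succ]
      simp
    rw [hrow, hseg, (by omega : (L + 1) + ((i - 1 : Nat) : Int) - 1 = L + (i : Int) - 1)]
    simp [List.append_assoc]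

-- B's whole flat loop = the same rows A builds
theorem pvFoldB (cs : List Char) (n : Int) : ∀ (k : Nat),
    (PySem.List.pyRange 0 (pvTri k) 1).foldl (pvStepB cs n) ([], 1, 0)
      = (pvRows cs n k, (k : Int) + 1, 0) := by
  intro k
  induction k with
  | zero => simp [pvTri, PySem.List.pyRange_one_eq_nil, pvRows]
  | succ k ih =>
    have hsplit : PySem.List.pyRange 0 (pvTri (k + 1)) 1
        = PySem.List.pyRange 0 (pvTri k) 1 ++ PySem.List.pyRange (pvTri k) (pvTri (k + 1)) 1 :=
      PySem.List.pyRange_one_append 0 (pvTri k) (pvTri (k + 1)) (pvTri_nonneg k)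
        (by simp only [pvTri]; omega)
    rw [hsplit, List.foldl_append, ih]
    have hend : pvTri (k + 1) = pvTri k + ((k + 1 : Nat) : Int) := by
      simp only [pvTri]; push_cast; ring
    rw [hend, (by push_cast; ring : ((k : Nat) : Int) + 1 = ((k + 1 : Nat) : Int)),
      pvRowFold cs n (k + 1) (by omega) (pvTri k) (pvRows cs n k)]
    simp only [pvRows]
    constructor

-- '\n'-terminated concatenation vs '\n'-join
theorem pvFlattenJoin (c : Char) (R : List (List Char)) (h : R ≠ []) :
    ((R.map (· ++ [c])).flatten = PySem.Chars.join [c] R ++ [c]) := by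
  induction R with
  | nil => simp at h
  | cons x R ih =>
    cases R with
    | nil => simp [PySem.Chars.join_singleton]
    | cons y R =>
      rw [PySem.Chars.join_cons_cons]
      simp only [List.map_cons, List.flatten_cons] at *
      rw [ih (by simp)]
      simp [List.append_assoc]

-- A's repeated-and-trimmed trunk = B's '\n'-joined trunk
theorem pvTrunkEq (r : List Char) (K : Nat) :
    ((List.replicate K (r ++ ['\n'])).flatten).dropLast = PySem.Chars.join ['\n'] (List.replicate K r) := by
  cases K with
  | zero => simp [PySem.Chars.join_nil]
  | succ K =>
    have hmap : List.replicate (K + 1) (r ++ ['\n'])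
        = (List.replicate (K + 1) r).map (· ++ ['\n']) := by simp [List.map_replicate]
    rw [hmap, pvFlattenJoin '\n' _ (by simp), List.dropLast_concat]

-- ===== VERDICT (by name: the statement is the Claim_ definition above) =====
theorem ccquiel_day26_spec : Claim_equal_ccquiel_day26 := by
  intro chars n _hdom _hpre
  simp only [Spec_ccquiel_day26, ccquiel_day26, ccquiel_day26_alt]
  by_cases hn : 0 < n
  · obtain ⟨N, rfl⟩ : ∃ N : Nat, n = (N : Int) := ⟨n.toNat, by omega⟩
    set cs := chars.toList with hcs
    have htot : (if 0 < ((N : Nat) : Int) then PySem.Int.floordiv (((N:Nat):Int) * (((N:Nat):Int) + 1)) 2 else 0) = pvTri N := by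
      rw [if_pos hn, PySem.Int.floordiv_eq_ediv_of_pos (by norm_num)]
      have := pvTri_two_mul N
      omega
    rw [htot, pvFoldA cs ((N:Nat):Int) N, pvFoldB cs ((N:Nat):Int) N]
    congr 1
    rw [pvRep, PySem.List.slice_to_neg_one,
      (by simp [List.append_assoc] :
        List.replicate (((N:Nat):Int) - 1).toNat ' ' ++ ['|', '\n']
          = (List.replicate (((N:Nat):Int) - 1).toNat ' ' ++ ['|']) ++ ['\n'])]
    exact congrArg _ (pvTrunkEq _ _)
  · have hnil : PySem.List.pyRange 1 (n + 1) 1 = [] := PySem.List.pyRange_one_eq_nil (by omega)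
    have hK : PySem.Int.floordiv n 3 ≤ 0 := by
      rw [PySem.Int.floordiv_eq_ediv_of_pos (by norm_num)]; omega
    have hz2 : (n / 3).toNat = 0 := by omega
    rw [if_neg hn, hnil, PySem.List.pyRange_one_eq_nil le_rfl]
    simp [pvRep, hz2, PySem.Chars.join_nil, PySem.List.slice_to_neg_one]
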